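-- pv_equiv track=rewrite | github.com/josefkarasek/cstats | cst.py | delete_strings
-- ===== SOURCE A (Python) =====
-- def delete_strings(file_content):
--     """
--     Odstraneni retezcu ze zdrojoveho kodu.
--     Implementovano pomoci DFA.
--     """
--     INIT = 0
--     S_STRING = 1
--     state = INIT
--     final_string = ""
--
--     for char in file_content:
--         if state == INIT:
--             if char == '"':
--                 state = S_STRING
--             else:
--                 final_string += char
--
--         elif state == S_STRING:
--             if char == '"':
--                 state = INIT
--     return final_string
-- ===== SOURCE B (Python) =====
-- def delete_strings(file_content):
--     """Remove double-quoted string literals: the quotes toggle keep/drop, so the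
--     even-indexed pieces of a split on '"' are exactly the kept text."""
--     parts = file_content.split('"')
--     return ''.join(parts[::2])
-- ===== Notes on version B (the rewrite author's own statement) =====
-- stated objective: simpler
-- what changed: Replaces the per-character DFA with one string-level split on the double-quote character followed by joining the even-indexed segments (quotes toggle keep/drop), removing the explicit state machine.
import Mathlib
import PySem

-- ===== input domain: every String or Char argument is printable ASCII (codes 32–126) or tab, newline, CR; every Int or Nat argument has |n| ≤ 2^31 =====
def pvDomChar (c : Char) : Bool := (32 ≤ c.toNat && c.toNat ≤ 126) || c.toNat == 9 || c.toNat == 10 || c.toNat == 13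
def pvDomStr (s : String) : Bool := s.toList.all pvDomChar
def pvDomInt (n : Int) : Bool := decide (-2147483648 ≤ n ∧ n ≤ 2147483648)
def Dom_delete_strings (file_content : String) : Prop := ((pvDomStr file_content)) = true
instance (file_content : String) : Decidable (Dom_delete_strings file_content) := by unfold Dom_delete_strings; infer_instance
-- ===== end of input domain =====

-- B replaces A's per-character DFA with one split on '"' plus a join of the even-indexed segments (simpler decomposition).


-- ===== PORT A =====
-- state INIT = 0, S_STRING = 1; final_string accumulated as a char list (Python's += on str)
def delete_strings (file_content : String) : String :=
  let r := file_content.toList.foldl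
    (fun (st : Int × List Char) char =>
      if st.1 = 0 then
        if char = '"' then ((1 : Int), st.2) else (st.1, st.2 ++ [char])
      else if st.1 = 1 then
        if char = '"' then ((0 : Int), st.2) else st
      else st)
    ((0 : Int), ([] : List Char))
  String.ofList r.2

-- ===== PORT B =====
-- parts = file_content.split('"'); return ''.join(parts[::2])
-- (.getD: the literal sep '"' is nonempty and the literal step 2 is nonzero, so neither Option is none)
def delete_strings_alt (file_content : String) : String :=
  let parts := (PySem.Str.split? file_content "\"").getD []
  PySem.Str.join "" ((PySem.List.slice? parts none none 2).getD [])

-- ===== PRECONDITION & SPEC =====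
def Spec_delete_strings (file_content : String) (out : String) : Prop := out = delete_strings_alt file_content
instance (file_content : String) (out : String) : Decidable (Spec_delete_strings file_content out) := by unfold Spec_delete_strings; infer_instance

-- ===== CLAIM (what is proved, stated in full; the proofs are below) =====
def Claim_equal_delete_strings : Prop := ∀ (file_content : String), Dom_delete_strings file_content → Spec_delete_strings file_content (delete_strings file_content)

-- ===== LEMMAS AND PROOFS =====

-- A's DFA, directly recursive: `b = false` is state INIT, `b = true` is S_STRING.
def dfaRun : Bool → List Char → List Char
  | _, [] => []
  | false, c :: r => if c = '"' then dfaRun true r else c :: dfaRun false r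
  | true, c :: r => if c = '"' then dfaRun false r else dfaRun true r

-- split on '"', recursively
def consHead (p : List Char) : List (List Char) → List (List Char)
  | [] => [p]
  | x :: xs => (p ++ x) :: xs

def qsplit : List Char → List (List Char)
  | [] => [[]]
  | c :: r => if c = '"' then [] :: qsplit r else consHead [c] (qsplit r)

-- every other element, starting with the first (b = false) / the second (b = true)
def altPick {α : Type} : Bool → List α → List α
  | _, [] => []
  | false, p :: ps => p :: altPick true ps
  | true, _ :: ps => altPick false ps

theorem qsplit_ne_nil : ∀ (cs : List Char), qsplit cs ≠ []
  | [] => by simp [qsplit]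
  | c :: r => by
    simp only [qsplit]
    split
    · simp
    · cases h : qsplit r <;> simp [consHead]

theorem dfa_foldl : ∀ (cs : List Char) (acc : List Char),
    ((cs.foldl (fun (st : Int × List Char) char =>
      if st.1 = 0 then
        if char = '"' then ((1 : Int), st.2) else (st.1, st.2 ++ [char])
      else if st.1 = 1 then
        if char = '"' then ((0 : Int), st.2) else st
      else st) ((0 : Int), acc)).2 = acc ++ dfaRun false cs)
    ∧ ((cs.foldl (fun (st : Int × List Char) char =>
      if st.1 = 0 then
        if char = '"' then ((1 : Int), st.2) else (st.1, st.2 ++ [char])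
      else if st.1 = 1 then
        if char = '"' then ((0 : Int), st.2) else st
      else st) ((1 : Int), acc)).2 = acc ++ dfaRun true cs)
  | [], acc => by simp [dfaRun]
  | c :: r, acc => by
    by_cases hc : c = '"' <;>
      constructor <;>
      simp only [List.foldl_cons] <;>
      norm_num [hc, dfaRun] <;>
      first
        | exact (dfa_foldl r acc).1
        | exact (dfa_foldl r acc).2
        | simpa using (dfa_foldl r (acc ++ [c])).1

theorem splitOn_go_spec (cs : List Char) : ∀ (fuel : Nat), cs.length < fuel →
    ∀ (cur : List Char) (acc : List (List Char)),
    PySem.Chars.splitOn.go ['"'] fuel cs cur acc = acc.reverse ++ consHead cur.reverse (qsplit cs) := by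
  induction cs with
  | nil =>
    intro fuel h cur acc
    match fuel, h with
    | fuel + 1, _ => simp [PySem.Chars.splitOn.go, qsplit, consHead]
  | cons c r ih =>
    intro fuel h cur acc
    match fuel, h with
    | fuel + 1, h =>
      by_cases hc : c = '"'
      · subst hc
        rw [PySem.Chars.splitOn.go]
        rw [if_pos (by simp [List.isPrefixOf])]
        rw [show List.drop (['"'].length) ('"' :: r) = r from rfl]
        rw [ih fuel (by simpa using h) [] (cur.reverse :: acc)]
        simp only [qsplit, List.reverse_cons, List.reverse_nil]
        cases h' : qsplit r with
        | nil => exact absurd h' (qsplit_ne_nil r)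
        | cons p ps => simp [consHead, List.append_assoc]
      · rw [PySem.Chars.splitOn.go]
        rw [if_neg (by simp [List.isPrefixOf]; exact fun h => hc h.symm)]
        rw [ih fuel (by simpa using h) (c :: cur) acc]
        simp only [qsplit, if_neg hc, List.reverse_cons]
        cases h' : qsplit r <;> simp [consHead]

theorem splitOn_eq_qsplit (cs : List Char) :
    PySem.Chars.splitOn cs ['"'] = qsplit cs := by
  rw [PySem.Chars.splitOn, splitOn_go_spec cs (cs.length + 1) (by omega)]
  cases h : qsplit cs with
  | nil => exact absurd h (qsplit_ne_nil cs)
  | cons p ps => simp [consHead]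

theorem dfaParts_flatten (cs : List Char) : ∀ b, dfaRun b cs = (altPick b (qsplit cs)).flatten := by
  induction cs with
  | nil => intro b; cases b <;> simp [qsplit, altPick, dfaRun]
  | cons c r ih =>
    intro b
    by_cases hc : c = '"'
    · cases b <;> simp [dfaRun, hc, qsplit, altPick, ih]
    · obtain ⟨p, ps, hps⟩ : ∃ p ps, qsplit r = p :: ps := by
        cases h : qsplit r with
        | nil => exact absurd h (qsplit_ne_nil r)
        | cons p ps => exact ⟨p, ps, rfl⟩
      cases b <;> simp [dfaRun, hc, qsplit, hps, consHead, altPick, ih]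

theorem filterMap_two {α : Type} : ∀ (l : List α),
    List.filterMap (fun k => l[2*k]?) (List.range ((l.length+1)/2)) = altPick false l
  | [] => by simp [altPick]
  | [a] => by simp [altPick]
  | a :: b :: t => by
    have h2 : ((a :: b :: t).length + 1) / 2 = (t.length + 1) / 2 + 1 := by
      simp only [List.length_cons]; omega
    rw [h2, List.range_succ_eq_map, List.filterMap_cons, List.filterMap_map]
    simp only [Nat.mul_zero, List.getElem?_cons_zero]
    have hfun : (fun k => (a :: b :: t)[2*k]?) ∘ (· + 1) = fun k => t[2*k]? := by
      funext k
      simp only [Function.comp]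
      rw [show 2 * (k + 1) = 2 * k + 2 from by omega]
      simp
    rw [hfun, filterMap_two t]
    simp [altPick]

theorem slice_two {α : Type} (l : List α) :
    PySem.List.slice? l none none 2 = some (altPick false l) := by
  rw [PySem.List.slice?]
  rw [if_neg (by norm_num)]
  simp only [PySem.List.sliceIndices]
  norm_num
  rw [show (if 0 < l.length then (((l.length : Int) + 2 - 1) / 2).toNat else 0)
      = (l.length + 1) / 2 from by split <;> omega]
  rw [← filterMap_two l]
  congr 1

theorem altPick_map {α β : Type} (f : α → β) : ∀ (b : Bool) (l : List α),
    altPick b (l.map f) = (altPick b l).map f := by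
  intro b l
  induction l generalizing b with
  | nil => cases b <;> simp [altPick]
  | cons x xs ih => cases b <;> simp [altPick, ih]

theorem join_nil_flatten : ∀ (l : List (List Char)), PySem.Chars.join [] l = l.flatten
  | [] => by simp [PySem.Chars.join_nil]
  | [a] => by simp [PySem.Chars.join_singleton]
  | a :: b :: t => by
    rw [PySem.Chars.join_cons_cons, join_nil_flatten (b :: t)]
    simp

-- ===== VERDICT (by name: the statement is the Claim_ definition above) =====
theorem delete_strings_spec : Claim_equal_delete_strings := by
  intro s _
  unfold Spec_delete_strings delete_strings delete_strings_alt
  apply String.toList_inj.mp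
  have hsplit : PySem.Str.split? s "\"" = some ((qsplit s.toList).map String.ofList) := by
    rw [PySem.Str.split?]
    have h1 : PySem.Chars.split? s.toList ("\"".toList) = some (PySem.Chars.splitOn s.toList ['"']) := by
      rw [PySem.Chars.split?]; simp
    rw [h1, splitOn_eq_qsplit]
    rfl
  rw [hsplit]
  simp only [Option.getD_some]
  rw [slice_two, Option.getD_some, PySem.Str.toList_join]
  rw [altPick_map, List.map_map]
  rw [show (String.toList ∘ String.ofList) = id from funext fun l => by simp]
  rw [List.map_id, show ("" : String).toList = [] from rfl, join_nil_flatten]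
  rw [String.toList_ofList, (dfa_foldl s.toList []).1]
  simpa using dfaParts_flatten s.toList false
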